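-- pv_equiv track=rewrite | github.com/freeipa/freeipa | ipa-python/config.py | format_usage
-- ===== SOURCE A (Python) =====
-- def format_usage(usage):
--     usage_string = "Usage:"
--     spacing = " " * len(usage_string)
--     lines = usage.split("\n")
--     ret = "%s %s\n" % (usage_string, lines[0])
--     for line in lines[1:]:
--         ret += "%s %s\n" % (spacing, line)
--     return ret
-- ===== SOURCE B (Python) =====
-- def format_usage(usage):
--     return "Usage: " + usage.replace("\n", "\n" + " " * 7) + "\n"
-- ===== Notes on version B (the rewrite author's own statement) =====
-- stated objective: idiomatic
-- what changed: Replaces the split-into-lines-and-loop construction with a single whole-string replace of each newline by a newline plus 7 spaces, bracketed by the usage prefix and a final newline.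
import Mathlib
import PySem

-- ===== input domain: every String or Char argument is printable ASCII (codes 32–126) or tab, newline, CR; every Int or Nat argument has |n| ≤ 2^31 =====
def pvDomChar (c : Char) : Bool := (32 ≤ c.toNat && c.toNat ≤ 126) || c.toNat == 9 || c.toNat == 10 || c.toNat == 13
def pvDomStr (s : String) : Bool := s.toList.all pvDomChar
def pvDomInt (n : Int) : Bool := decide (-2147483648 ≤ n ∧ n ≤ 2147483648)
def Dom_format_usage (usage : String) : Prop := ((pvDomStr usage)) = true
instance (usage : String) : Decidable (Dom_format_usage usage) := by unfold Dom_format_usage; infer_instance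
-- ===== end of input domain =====

-- B replaces A's split-into-lines loop by one whole-string replace of '\n' with '\n' + 7 spaces (idiomatic, same cost).

-- ===== PORT A =====
-- split usage on '\n', emit "Usage: <line0>\n", then one indented "<6 spaces> <line>\n" per further line
def format_usage (usage : String) : String :=
  let usage_string : List Char := "Usage:".toList
  let spacing : List Char := List.replicate usage_string.length ' '      -- " " * len(usage_string)
  let lines := PySem.Chars.splitOn usage.toList ['\n']
  -- lines[0]: splitOn never returns [], so pyGet? is some; getD [] only discharges the Option
  let ret := usage_string ++ [' '] ++ (PySem.List.pyGet? lines 0).getD [] ++ ['\n']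
  let ret := (PySem.List.slice lines (some 1) none).foldl
      (fun acc line => acc ++ (spacing ++ [' '] ++ line ++ ['\n'])) ret
  String.mk ret

-- ===== PORT B =====
def format_usage_alt (usage : String) : String :=
  String.mk ("Usage: ".toList ++
    PySem.Chars.replace usage.toList ['\n'] ('\n' :: List.replicate 7 ' ') ++ ['\n'])

-- ===== PRECONDITION & SPEC =====
def Spec_format_usage (usage : String) (out : String) : Prop := out = format_usage_alt usage
instance (usage : String) (out : String) : Decidable (Spec_format_usage usage out) := by unfold Spec_format_usage; infer_instance

-- ===== CLAIM (what is proved, stated in full; the proofs are below) =====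
def Claim_equal_format_usage : Prop := ∀ (usage : String), Dom_format_usage usage → Spec_format_usage usage (format_usage usage)

-- ===== LEMMAS AND PROOFS =====

/-- Reference splitter: what `splitOn cs ['\n']` computes (always nonempty). -/
def pvSp : List Char → List (List Char)
  | [] => [[]]
  | c :: t =>
    if c = '\n' then [] :: pvSp t
    else
      match pvSp t with
      | [] => [[c]]        -- unreachable
      | s :: ss => (c :: s) :: ss

/-- Reference replacement: what `replace cs ['\n'] ('\n' :: 7 spaces)` computes. -/
def pvRep : List Char → List Char
  | [] => []
  | c :: t => if c = '\n' then '\n' :: (List.replicate 7 ' ' ++ pvRep t) else c :: pvRep t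

theorem pvSp_ne_nil (cs : List Char) : pvSp cs ≠ [] := by
  cases cs with
  | nil => simp [pvSp]
  | cons c t =>
    simp only [pvSp]
    split
    · simp
    · cases h : pvSp t <;> simp

/-- prepend to the head segment -/
def pvPre (p : List Char) : List (List Char) → List (List Char)
  | [] => [p]
  | s :: ss => (p ++ s) :: ss

theorem pvSplit_go (fuel : Nat) (l cur : List Char) (accL : List (List Char))
    (h : l.length < fuel) :
    PySem.Chars.splitOn.go ['\n'] fuel l cur accL =
      accL.reverse ++ pvPre cur.reverse (pvSp l) := by
  induction fuel generalizing l cur accL with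
  | zero => omega
  | succ f ih =>
    cases l with
    | nil => simp [PySem.Chars.splitOn.go, pvSp, pvPre]
    | cons c t =>
      simp only [PySem.Chars.splitOn.go]
      simp only [List.length_cons] at h
      by_cases hc : c = '\n'
      · subst hc
        have hp : List.isPrefixOf ['\n'] ('\n' :: t) = true := by simp [List.isPrefixOf]
        rw [if_pos hp]
        rw [show List.drop (['\n'].length) ('\n' :: t) = t from rfl]
        rw [ih t [] _ (by omega)]
        cases hs : pvSp t with
        | nil => exact absurd hs (pvSp_ne_nil t)
        | cons s ss => simp [pvSp, pvPre, hs]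
      · have hp : List.isPrefixOf ['\n'] (c :: t) = false := by
          simp [List.isPrefixOf, Ne.symm hc]
        rw [if_neg (by simp [hp])]
        rw [ih t (c :: cur) _ (by omega)]
        cases hs : pvSp t with
        | nil => exact absurd hs (pvSp_ne_nil t)
        | cons s ss => simp [pvSp, pvPre, hs, hc]

theorem pvSplit_eq (cs : List Char) : PySem.Chars.splitOn cs ['\n'] = pvSp cs := by
  have h := pvSplit_go (cs.length + 1) cs [] [] (by omega)
  rw [PySem.Chars.splitOn, h]
  cases hs : pvSp cs with
  | nil => exact absurd hs (pvSp_ne_nil cs)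
  | cons s ss => simp [pvPre]

theorem pvReplace_go (fuel : Nat) (l acc : List Char) (h : l.length ≤ fuel) :
    PySem.Chars.replace.go ['\n'] ('\n' :: List.replicate 7 ' ') fuel l acc =
      acc.reverse ++ pvRep l := by
  induction fuel generalizing l acc with
  | zero =>
    have : l = [] := by cases l <;> simp_all
    subst this
    simp [PySem.Chars.replace.go, pvRep]
  | succ f ih =>
    cases l with
    | nil => simp [PySem.Chars.replace.go, pvRep]
    | cons c t =>
      simp only [PySem.Chars.replace.go]
      simp only [List.length_cons] at h
      by_cases hc : c = '\n'
      · subst hc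
        have hp : List.isPrefixOf ['\n'] ('\n' :: t) = true := by simp [List.isPrefixOf]
        rw [if_pos hp]
        rw [show List.drop (['\n'].length) ('\n' :: t) = t from rfl]
        rw [ih t _ (by omega)]
        simp [pvRep]
      · have hp : List.isPrefixOf ['\n'] (c :: t) = false := by
          simp [List.isPrefixOf, Ne.symm hc]
        rw [if_neg (by simp [hp])]
        rw [ih t (c :: acc) (by omega)]
        simp [pvRep, hc]

theorem pvReplace_eq (cs : List Char) :
    PySem.Chars.replace cs ['\n'] ('\n' :: List.replicate 7 ' ') = pvRep cs := by
  simpa [PySem.Chars.replace] using pvReplace_go cs.length cs [] (le_refl _)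

/-- A's continuation-line builder, applied to a segment. -/
def pvG (line : List Char) : List Char := List.replicate 6 ' ' ++ [' '] ++ line ++ ['\n']

/-- A's assembly of the segment list: first segment, newline, then the indented rest. -/
def pvJ : List (List Char) → List Char
  | [] => ['\n']          -- unreachable: pvSp is never []
  | l0 :: ls => l0 ++ '\n' :: ls.flatMap pvG

theorem pvFlatMap_pvG (h0 : List Char) (ts : List (List Char)) :
    (h0 :: ts).flatMap pvG = List.replicate 7 ' ' ++ pvJ (h0 :: ts) := by
  simp [pvG, pvJ, List.replicate_succ]

theorem pvJ_sp (cs : List Char) : pvJ (pvSp cs) = pvRep cs ++ ['\n'] := by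
  induction cs with
  | nil => simp [pvSp, pvJ, pvRep]
  | cons c t ih =>
    by_cases hc : c = '\n'
    · subst hc
      rw [show pvSp ('\n' :: t) = [] :: pvSp t from by simp [pvSp]]
      rw [show pvRep ('\n' :: t) = '\n' :: (List.replicate 7 ' ' ++ pvRep t) from by
        simp [pvRep]]
      cases ht : pvSp t with
      | nil => exact absurd ht (pvSp_ne_nil t)
      | cons h0 ts =>
        rw [pvJ, pvFlatMap_pvG, ← ht, ih]
        simp
    · cases ht : pvSp t with
      | nil => exact absurd ht (pvSp_ne_nil t)
      | cons h0 ts =>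
        rw [show pvSp (c :: t) = (c :: h0) :: ts from by simp [pvSp, hc, ht]]
        rw [show pvRep (c :: t) = c :: pvRep t from by simp [pvRep, hc]]
        have := ih
        rw [ht] at this
        simp only [pvJ] at this ⊢
        simp [this]

-- ===== VERDICT (by name: the statement is the Claim_ definition above) =====
theorem format_usage_spec : Claim_equal_format_usage := by
  intro usage _
  unfold Spec_format_usage format_usage format_usage_alt
  rw [pvSplit_eq, pvReplace_eq]
  cases hs : pvSp usage.toList with
  | nil => exact absurd hs (pvSp_ne_nil usage.toList)
  | cons l0 ls =>
    have hkey := pvJ_sp usage.toList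
    rw [hs] at hkey
    simp only [pvJ] at hkey
    simp only [PySem.List.foldl_append_eq_flatMap]
    rw [show ("Usage:".toList).length = 6 from rfl]
    rw [show "Usage: ".toList = "Usage:".toList ++ [' '] from rfl]
    congr 1
    have h0 : (PySem.List.pyGet? (l0 :: ls) 0).getD [] = l0 := by simp [pysem]
    have h1 : PySem.List.slice (l0 :: ls) (some 1) none = ls := by simp [pysem]
    rw [h0, h1]
    have hfl : List.flatMap (fun x => List.replicate 6 ' ' ++ [' '] ++ x ++ ['\n']) ls
        = List.flatMap pvG ls := rfl
    rw [hfl]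
    simp only [List.append_assoc, List.cons_append]
    rw [← hkey]
    simp
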